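-- pv_equiv track=rewrite | github.com/JeG99/recocido-simulado | my_maths.py | count_cities
-- ===== SOURCE A (Python) =====
-- def count_cities(path):
--     cities = 0
--     index = 0
--     cities_per_traveler = []
--     needs_correction = False
--     for city in path:
--         if city != -1:
--             cities += 1
--         else:
--             cities_per_traveler.append((index, cities))
--             if cities < 2:
--                 needs_correction = True
--             cities = 0
--         index += 1
--
--     return needs_correction, cities_per_traveler
-- ===== SOURCE B (Python) =====
-- def count_cities(path):
--     seps = [i for i, city in enumerate(path) if city == -1]
--     needs_correction = False
--     cities_per_traveler = []
--     prev = -1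
--     for s in seps:
--         count = s - prev - 1
--         cities_per_traveler.append((s, count))
--         if count < 2:
--             needs_correction = True
--         prev = s
--     return needs_correction, cities_per_traveler
-- ===== Notes on version B (the rewrite author's own statement) =====
-- stated objective: alternative
-- what changed: B first collects the separator indices (enumerate+filter) and then derives each segment's city count as the difference of consecutive separator positions, instead of A's single accumulate-and-reset counter scan.
import Mathlib
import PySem

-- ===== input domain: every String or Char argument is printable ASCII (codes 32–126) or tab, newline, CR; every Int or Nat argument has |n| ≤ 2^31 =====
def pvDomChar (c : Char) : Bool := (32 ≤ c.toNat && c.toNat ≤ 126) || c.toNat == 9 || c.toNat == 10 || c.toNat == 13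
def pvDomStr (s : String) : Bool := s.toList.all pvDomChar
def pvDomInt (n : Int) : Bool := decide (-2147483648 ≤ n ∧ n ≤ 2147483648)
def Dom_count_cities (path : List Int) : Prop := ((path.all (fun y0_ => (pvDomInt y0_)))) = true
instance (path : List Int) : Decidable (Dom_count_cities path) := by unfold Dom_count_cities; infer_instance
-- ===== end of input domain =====

-- B replaces A's accumulate-and-reset counter with a two-phase separator-index + positional-difference computation; same O(n) cost (objective: alternative).

-- ===== PORT A =====
def pvA_go (path : List Int) (cities index : Int) (acc : List (Int × Int)) (flag : Bool) :
    Bool × (List (Int × Int)) :=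
  match path with
  | [] => (flag, acc)
  | city :: rest =>
    if city ≠ -1 then
      pvA_go rest (cities + 1) (index + 1) acc flag
    else
      pvA_go rest 0 (index + 1) (acc ++ [(index, cities)]) (flag || decide (cities < 2))

def count_cities (path : List Int) : Bool × (List (Int × Int)) :=
  pvA_go path 0 0 [] false

-- ===== PORT B =====
def pvB_seps (path : List Int) : List Int :=
  ((PySem.List.enumerate path).filter (fun p => p.2 == -1)).map (fun p => p.1)

def pvB_go (seps : List Int) (prev : Int) (acc : List (Int × Int)) (flag : Bool) :
    Bool × (List (Int × Int)) :=
  match seps with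
  | [] => (flag, acc)
  | s :: rest =>
    let count := s - prev - 1
    pvB_go rest s (acc ++ [(s, count)]) (flag || decide (count < 2))

def count_cities_alt (path : List Int) : Bool × (List (Int × Int)) :=
  pvB_go (pvB_seps path) (-1) [] false

-- ===== PRECONDITION & SPEC =====
def Spec_count_cities (path : List Int) (out : Bool × (List (Int × Int))) : Prop := out = count_cities_alt path
instance (path : List Int) (out : Bool × (List (Int × Int))) : Decidable (Spec_count_cities path out) := by unfold Spec_count_cities; infer_instance

-- ===== CLAIM (what is proved, stated in full; the proofs are below) =====
def Claim_equal_count_cities : Prop := ∀ (path : List Int), Dom_count_cities path → Spec_count_cities path (count_cities path)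

-- ===== LEMMAS AND PROOFS =====

-- separator indices of `path`, offset by the starting index k (proof-only helper)
def sepsFrom : List Int → Int → List Int
  | [], _ => []
  | x :: xs, k => if x = -1 then k :: sepsFrom xs (k + 1) else sepsFrom xs (k + 1)

theorem pvB_seps_eq (path : List Int) (k : Int) :
    ((PySem.List.enumerate path k).filter (fun p => p.2 == -1)).map (fun p => p.1)
      = sepsFrom path k := by
  induction path generalizing k with
  | nil => simp [sepsFrom, PySem.List.enumerate_nil]
  | cons x xs ih =>
    simp only [PySem.List.enumerate_cons, List.filter_cons, sepsFrom]
    by_cases h : x = -1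
    · simp [h, ih]
    · simp [h, ih]

theorem main_lemma (path : List Int) (cities index : Int) (acc : List (Int × Int)) (flag : Bool) :
    pvA_go path cities index acc flag
      = pvB_go (sepsFrom path index) (index - cities - 1) acc flag := by
  induction path generalizing cities index acc flag with
  | nil => simp [pvA_go, sepsFrom, pvB_go]
  | cons x xs ih =>
    by_cases h : x = -1
    · subst h
      simp only [pvA_go, sepsFrom, if_neg (show ¬ ((-1:Int) ≠ -1) by simp), if_true]
      rw [ih]
      simp only [pvB_go]
      have h1 : index - (index - cities - 1) - 1 = cities := by ring
      have h2 : index + 1 - 0 - 1 = index := by ring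
      rw [h1, h2]
    · simp only [pvA_go, sepsFrom, if_pos h, if_neg h]
      rw [ih]
      have h3 : index + 1 - (cities + 1) - 1 = index - cities - 1 := by ring
      rw [h3]

-- ===== VERDICT (by name: the statement is the Claim_ definition above) =====
theorem count_cities_spec : Claim_equal_count_cities := by
  intro path _
  unfold Spec_count_cities count_cities count_cities_alt pvB_seps
  rw [pvB_seps_eq, main_lemma]
  norm_num
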